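-- pv_equiv track=rewrite | github.com/Aparna0112/chatterbox-tts-jwt | main.py | _text_to_phonemes
-- ===== SOURCE A (Python) =====
-- def _text_to_phonemes(text: str) -> list:
--     """Convert text to simplified phonemes for speech synthesis"""
--     text = text.lower()
--     phonemes = []
--
--     i = 0
--     while i < len(text):
--         char = text[i]
--
--         # Handle digraphs (two-character combinations)
--         if i < len(text) - 1:
--             digraph = text[i:i+2]
--             if digraph == 'th':
--                 phonemes.append('th')
--                 i += 2
--                 continue
--             elif digraph == 'ch':
--                 phonemes.append('j')  # ch sound similar to j
--                 i += 2
--                 continue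
--             elif digraph == 'sh':
--                 phonemes.append('s')  # simplified
--                 i += 2
--                 continue
--
--         if char in 'aeiou':
--             phonemes.append(char)
--         elif char in 'bcdfgjklmnpqrstvwxyz':
--             phonemes.append(char)
--         elif char == ' ':
--             phonemes.append('pause')
--         elif char in '.,!?;:':
--             phonemes.append('long_pause')
--         elif char in '-–—':
--             phonemes.append('pause')
--         else:
--             # Skip unknown characters or add as pause
--             if char.isalnum():
--                 phonemes.append('default')
--
--         i += 1
--
--     return phonemes
-- ===== SOURCE B (Python) =====
-- import re
--
-- _TOKEN_RE = re.compile(r'th|ch|sh|.')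
--
-- _PHONEME_TABLE = {'th': 'th', 'ch': 'j', 'sh': 's', ' ': 'pause'}
-- for _c in 'aeiou' + 'bcdfgjklmnpqrstvwxyz':
--     _PHONEME_TABLE[_c] = _c
-- for _c in '.,!?;:':
--     _PHONEME_TABLE[_c] = 'long_pause'
-- for _c in '-\u2013\u2014':
--     _PHONEME_TABLE[_c] = 'pause'
--
--
-- def _text_to_phonemes(text: str) -> list:
--     """Convert text to simplified phonemes for speech synthesis"""
--     phonemes = []
--     for token in _TOKEN_RE.findall(text.lower()):
--         mapped = _PHONEME_TABLE.get(token)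
--         if mapped is not None:
--             phonemes.append(mapped)
--         elif token.isalnum():
--             phonemes.append('default')
--     return phonemes
-- ===== Notes on version B (the rewrite author's own statement) =====
-- stated objective: idiomatic
-- what changed: Replaced the manual while-loop with explicit index stepping and an if/elif classification chain by a regex tokenizer (re.findall(r'th|ch|sh|.')) plus a precomputed token-to-phoneme lookup table.
import Mathlib
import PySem

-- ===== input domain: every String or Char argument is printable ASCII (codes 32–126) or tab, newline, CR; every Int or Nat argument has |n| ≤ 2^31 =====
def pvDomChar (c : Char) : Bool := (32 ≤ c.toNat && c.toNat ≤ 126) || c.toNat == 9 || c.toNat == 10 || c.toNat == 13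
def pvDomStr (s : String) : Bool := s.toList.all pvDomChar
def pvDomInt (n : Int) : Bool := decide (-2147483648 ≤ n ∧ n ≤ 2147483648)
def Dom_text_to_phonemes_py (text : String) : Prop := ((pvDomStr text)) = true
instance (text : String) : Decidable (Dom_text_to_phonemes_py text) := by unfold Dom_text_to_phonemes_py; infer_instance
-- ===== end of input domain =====

set_option maxRecDepth 8000
set_option maxHeartbeats 1000000

-- B replaces A's manual index-stepping while-loop and if/elif classification chain by a regex
-- tokenizer plus a precomputed token→phoneme lookup table (objective: idiomatic).

-- ===== PORT A =====
-- A's while-loop over the index i: the digraph check (possible only while i < len-1,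
-- i.e. at least two chars remain) first, then the if/elif single-char classification.
def goA : List Char → List String
  | [] => []
  | c :: rest =>
    match rest with
    | c2 :: rest' =>
      if c = 't' ∧ c2 = 'h' then "th" :: goA rest'
      else if c = 'c' ∧ c2 = 'h' then "j" :: goA rest'
      else if c = 's' ∧ c2 = 'h' then "s" :: goA rest'
      else
        (if ("aeiou".toList).contains c then [String.ofList [c]]
         else if ("bcdfgjklmnpqrstvwxyz".toList).contains c then [String.ofList [c]]
         else if c = ' ' then ["pause"]
         else if (".,!?;:".toList).contains c then ["long_pause"]
         else if ("-–—".toList).contains c then ["pause"]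
         else if PySem.Chars.isalnum c then ["default"]
         else []) ++ goA (c2 :: rest')
    | [] =>
        (if ("aeiou".toList).contains c then [String.ofList [c]]
         else if ("bcdfgjklmnpqrstvwxyz".toList).contains c then [String.ofList [c]]
         else if c = ' ' then ["pause"]
         else if (".,!?;:".toList).contains c then ["long_pause"]
         else if ("-–—".toList).contains c then ["pause"]
         else if PySem.Chars.isalnum c then ["default"]
         else []) ++ goA []

def text_to_phonemes_py (text : String) : List String :=
  goA (PySem.Str.lower text).toList

-- ===== PORT B =====
-- the module-level table _PHONEME_TABLE, built exactly as in Source B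
def phonemeTable : PySem.Dict String String :=
  let d := PySem.Dict.ofList [("th", "th"), ("ch", "j"), ("sh", "s"), (" ", "pause")]
  let d := (("aeiou" ++ "bcdfgjklmnpqrstvwxyz").toList).foldl
             (fun d c => d.insert (String.ofList [c]) (String.ofList [c])) d
  let d := (".,!?;:".toList).foldl (fun d c => d.insert (String.ofList [c]) "long_pause") d
  ("-–—".toList).foldl (fun d c => d.insert (String.ofList [c]) "pause") d

-- re.findall(r'th|ch|sh|.') hand-ported: greedy left-to-right alternation, digraph
-- alternatives tried first at each position; '.' matches any char except '\n' (exact)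
def tokenize : List Char → List String
  | [] => []
  | c :: rest =>
    match rest with
    | c2 :: rest' =>
      if c = 't' ∧ c2 = 'h' then "th" :: tokenize rest'
      else if c = 'c' ∧ c2 = 'h' then "ch" :: tokenize rest'
      else if c = 's' ∧ c2 = 'h' then "sh" :: tokenize rest'
      else if c = '\n' then tokenize (c2 :: rest')
      else String.ofList [c] :: tokenize (c2 :: rest')
    | [] => if c = '\n' then [] else [String.ofList [c]]

def text_to_phonemes_py_alt (text : String) : List String :=
  (tokenize (PySem.Str.lower text).toList).foldl
    (fun out tok =>
      match phonemeTable.get? tok with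
      | some m => out ++ [m]
      | none => if PySem.Str.strIsalnum tok then out ++ ["default"] else out) []

-- ===== PRECONDITION & SPEC =====
def Spec_text_to_phonemes_py (text : String) (out : List String) : Prop := out = text_to_phonemes_py_alt text
instance (text : String) (out : List String) : Decidable (Spec_text_to_phonemes_py text out) := by unfold Spec_text_to_phonemes_py; infer_instance

-- ===== CLAIM (what is proved, stated in full; the proofs are below) =====
def Claim_equal_text_to_phonemes_py : Prop := ∀ (text : String), Dom_text_to_phonemes_py text → Spec_text_to_phonemes_py text (text_to_phonemes_py text)

-- ===== LEMMAS AND PROOFS =====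

-- B's loop body, output-only part, as a function of the token
def stepB (tok : String) : List String :=
  match phonemeTable.get? tok with
  | some m => [m]
  | none => if PySem.Str.strIsalnum tok then ["default"] else []

def flatB : List String → List String
  | [] => []
  | t :: ts => stepB t ++ flatB ts

lemma foldl_eq_flatB (ts : List String) (acc : List String) :
    ts.foldl (fun out tok =>
      match phonemeTable.get? tok with
      | some m => out ++ [m]
      | none => if PySem.Str.strIsalnum tok then out ++ ["default"] else out) acc
    = acc ++ flatB ts := by
  induction ts generalizing acc with
  | nil => simp [flatB]
  | cons t ts ih =>
    simp only [List.foldl_cons, flatB, stepB]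
    cases h : phonemeTable.get? t with
    | some m =>
      rw [ih]
      simp [List.append_assoc]
    | none =>
      by_cases ha : PySem.Str.strIsalnum t = true
      · simp only [if_pos ha]
        rw [ih]
        simp [List.append_assoc]
      · simp only [if_neg ha]
        rw [ih]
        simp

-- A's single-char classification chain
def stepA (c : Char) : List String :=
  if ("aeiou".toList).contains c then [String.ofList [c]]
  else if ("bcdfgjklmnpqrstvwxyz".toList).contains c then [String.ofList [c]]
  else if c = ' ' then ["pause"]
  else if (".,!?;:".toList).contains c then ["long_pause"]
  else if ("-–—".toList).contains c then ["pause"]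
  else if PySem.Chars.isalnum c then ["default"]
  else []

lemma char_lt (c : Char) (h : pvDomChar c = true) : c.toNat < 127 := by
  unfold pvDomChar at h
  generalize c.toNat = n at h ⊢
  simp only [Bool.or_eq_true, Bool.and_eq_true, decide_eq_true_eq, beq_iff_eq] at h
  omega

lemma step_eq_fin : ∀ n : Fin 127, pvDomChar (Char.ofNat n.val) = true →
    stepA (Char.ofNat n.val) = stepB (String.ofList [Char.ofNat n.val]) := by decide

lemma step_eq (c : Char) (h : pvDomChar c = true) : stepA c = stepB (String.ofList [c]) := by
  have hc : Char.ofNat c.toNat = c := Char.ofNat_toNat c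
  have := step_eq_fin ⟨c.toNat, char_lt c h⟩ (by rw [hc]; exact h)
  rwa [hc] at this

lemma step_newline : stepA '\n' = [] := by decide

lemma main_eq (l : List Char) : (∀ c ∈ l, pvDomChar c = true) →
    goA l = flatB (tokenize l) := by
  induction l using goA.induct with
  | case1 => intro _; rfl
  | case2 c c2 rest' h1 ih =>
    intro h
    obtain ⟨rfl, rfl⟩ := h1
    rw [show goA ('t' :: 'h' :: rest') = "th" :: goA rest' from by simp [goA],
        show tokenize ('t' :: 'h' :: rest') = "th" :: tokenize rest' from by simp [tokenize],
        ih (fun c hc => h c (by simp [hc]))]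
    simp only [flatB]
    rw [show stepB "th" = ["th"] from by decide]
    rfl
  | case3 c c2 rest' h1 h2 ih =>
    intro h
    obtain ⟨rfl, rfl⟩ := h2
    rw [show goA ('c' :: 'h' :: rest') = "j" :: goA rest' from by simp [goA],
        show tokenize ('c' :: 'h' :: rest') = "ch" :: tokenize rest' from by simp [tokenize],
        ih (fun c hc => h c (by simp [hc]))]
    simp only [flatB]
    rw [show stepB "ch" = ["j"] from by decide]
    rfl
  | case4 c c2 rest' h1 h2 h3 ih =>
    intro h
    obtain ⟨rfl, rfl⟩ := h3
    rw [show goA ('s' :: 'h' :: rest') = "s" :: goA rest' from by simp [goA],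
        show tokenize ('s' :: 'h' :: rest') = "sh" :: tokenize rest' from by simp [tokenize],
        ih (fun c hc => h c (by simp [hc]))]
    simp only [flatB]
    rw [show stepB "sh" = ["s"] from by decide]
    rfl
  | case5 c c2 rest' h1 h2 h3 ih =>
    intro h
    have hA : goA (c :: c2 :: rest') = stepA c ++ goA (c2 :: rest') := by
      simp only [goA, stepA, if_neg h1, if_neg h2, if_neg h3]
    have hrest : ∀ d ∈ c2 :: rest', pvDomChar d = true := fun d hd => h d (by simp [hd])
    by_cases hn : c = '\n'
    · subst hn
      rw [show tokenize ('\n' :: c2 :: rest') = tokenize (c2 :: rest') from by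
            simp [tokenize],
          hA, step_newline, List.nil_append]
      exact ih hrest
    · rw [show tokenize (c :: c2 :: rest') = String.ofList [c] :: tokenize (c2 :: rest') from by
            simp only [tokenize, if_neg h1, if_neg h2, if_neg h3, if_neg hn],
          hA, ih hrest]
      simp only [flatB]
      rw [step_eq c (h c (by simp))]
  | case6 c =>
    intro h
    have hA : goA [c] = stepA c ++ goA [] := by
      simp only [goA, stepA]
    by_cases hn : c = '\n'
    · subst hn
      rw [hA, step_newline]
      rw [show tokenize ['\n'] = [] from by simp [tokenize]]
      rfl
    · rw [hA, show tokenize [c] = [String.ofList [c]] from by simp [tokenize, hn]]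
      simp only [flatB, goA]
      rw [step_eq c (h c (by simp))]

lemma lower_dom (c : Char) (h : pvDomChar c = true) : pvDomChar (PySem.Chars.lowerChar c) = true := by
  have hc : Char.ofNat c.toNat = c := Char.ofNat_toNat c
  have key : ∀ n : Fin 127, pvDomChar (Char.ofNat n.val) = true →
      pvDomChar (PySem.Chars.lowerChar (Char.ofNat n.val)) = true := by decide
  have := key ⟨c.toNat, char_lt c h⟩ (by rw [hc]; exact h)
  rwa [hc] at this

-- ===== VERDICT (by name: the statement is the Claim_ definition above) =====
theorem text_to_phonemes_py_spec : Claim_equal_text_to_phonemes_py := by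
  intro text hdom
  unfold Spec_text_to_phonemes_py text_to_phonemes_py text_to_phonemes_py_alt
  rw [foldl_eq_flatB, List.nil_append]
  apply main_eq
  intro c hc
  have hl : (PySem.Str.lower text).toList = (text.toList).map PySem.Chars.lowerChar := by
    simp [PySem.Str.toList_lower, PySem.Chars.lower]
  rw [hl] at hc
  rcases List.mem_map.mp hc with ⟨d, hd, rfl⟩
  have hdc : pvDomChar d = true := by
    have h2 := hdom
    unfold Dom_text_to_phonemes_py pvDomStr at h2
    exact (List.all_eq_true.mp h2) d hd
  exact lower_dom d hdc
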